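-- pv_equiv track=rewrite | github.com/matti377/Open-ECG-Digitizer | scripts/analyze_wfdb_ecg.py | build_lead_trial_order
-- ===== SOURCE A (Python) =====
-- from typing import Dict, List, Optional, Tuple
--
-- def build_lead_trial_order(sig_names: List[str]) -> List[int]:
--     preferred = ["II", "I", "V5", "V6", "V2", "III", "V1", "V3", "V4", "AVL", "AVF", "AVR", "MLII"]
--     upper = [s.upper() for s in sig_names]
--
--     order = []
--     for p in preferred:
--         for i, s in enumerate(upper):
--             if s == p and i not in order:
--                 order.append(i)
--
--     for i in range(len(sig_names)):
--         if i not in order: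
--             order.append(i)
--
--     return order
-- ===== SOURCE B (Python) =====
-- def build_lead_trial_order(sig_names):
--     preferred = ["II", "I", "V5", "V6", "V2", "III", "V1", "V3", "V4", "AVL", "AVF", "AVR", "MLII"]
--     rank = {p: j for j, p in enumerate(preferred)}
--     buckets = [[] for _ in range(len(preferred) + 1)]
--     for i, s in enumerate(sig_names):
--         buckets[rank.get(s.upper(), len(preferred))].append(i)
--     return [i for b in buckets for i in b]
-- ===== Notes on version B (the rewrite author's own statement) =====
-- stated objective: faster
-- what changed: Instead of rescanning the lead list once per preferred name with a linear 'i not in order' membership test, B builds a rank table for the 13 preferred names once and distributes every index into its rank bucket (unknown names into an overflow bucket) in a single pass, concatenating the buckets.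
import Mathlib
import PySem

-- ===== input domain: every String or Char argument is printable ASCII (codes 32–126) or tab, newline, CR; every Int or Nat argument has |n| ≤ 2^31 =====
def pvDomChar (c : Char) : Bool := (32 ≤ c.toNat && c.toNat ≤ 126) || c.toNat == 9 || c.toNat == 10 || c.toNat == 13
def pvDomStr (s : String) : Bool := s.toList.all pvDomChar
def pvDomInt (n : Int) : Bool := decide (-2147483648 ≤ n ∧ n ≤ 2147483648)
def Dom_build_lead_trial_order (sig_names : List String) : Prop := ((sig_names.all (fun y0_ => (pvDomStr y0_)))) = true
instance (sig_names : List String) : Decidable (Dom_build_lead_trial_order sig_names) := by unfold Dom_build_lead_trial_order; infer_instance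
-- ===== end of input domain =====

-- B replaces A's per-preferred-name rescans of the lead list (each with a linear
-- membership test inside) by one rank table and a single bucketing pass over the names.

-- ===== PORT A =====
def pvPreferred : List String :=
  ["II", "I", "V5", "V6", "V2", "III", "V1", "V3", "V4", "AVL", "AVF", "AVR", "MLII"]

def build_lead_trial_order (sig_names : List String) : List Int :=
  let upper := sig_names.map PySem.Str.upper
  let order : List Int := pvPreferred.foldl (fun order p =>
    (PySem.List.enumerate upper 0).foldl (fun order is =>
      if is.2 == p && !(order.contains is.1) then order ++ [is.1] else order) order) []
  (PySem.List.pyRange 0 (sig_names.length : Int) 1).foldl (fun order i =>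
    if !(order.contains i) then order ++ [i] else order) order

-- ===== PORT B =====
def build_lead_trial_order_alt (sig_names : List String) : List Int :=
  let rank : PySem.Dict String Int :=
    (PySem.List.enumerate pvPreferred 0).foldl (fun d jp => d.insert jp.2 jp.1) PySem.Dict.empty
  let buckets : List (List Int) := List.replicate (pvPreferred.length + 1) []
  let buckets := (PySem.List.enumerate sig_names 0).foldl (fun bs is =>
    let r := (rank.getD (PySem.Str.upper is.2) (pvPreferred.length : Int)).toNat
    bs.set r (bs.getD r [] ++ [is.1])) buckets
  buckets.flatten

-- ===== PRECONDITION & SPEC =====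
def Spec_build_lead_trial_order (sig_names : List String) (out : List Int) : Prop := out = build_lead_trial_order_alt sig_names
instance (sig_names : List String) (out : List Int) : Decidable (Spec_build_lead_trial_order sig_names out) := by unfold Spec_build_lead_trial_order; infer_instance

-- ===== CLAIM (what is proved, stated in full; the proofs are below) =====
def Claim_equal_build_lead_trial_order : Prop := ∀ (sig_names : List String), Dom_build_lead_trial_order sig_names → Spec_build_lead_trial_order sig_names (build_lead_trial_order sig_names)

-- ===== LEMMAS AND PROOFS =====

-- B's rank dictionary, named for the proofs
def pvRankDict : PySem.Dict String Int :=
  (PySem.List.enumerate pvPreferred 0).foldl (fun d jp => d.insert jp.2 jp.1) PySem.Dict.empty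

-- the indices (in order) of the entries of l whose name satisfies q
def pvPick (l : List (Int × String)) (q : String → Bool) : List Int :=
  (l.filter (fun is => q is.2)).map (·.1)

lemma pvPick_cons (x : Int × String) (l : List (Int × String)) (q : String → Bool) :
    pvPick (x :: l) q = if q x.2 then x.1 :: pvPick l q else pvPick l q := by
  by_cases h : q x.2 <;> simp [pvPick, h]

lemma mem_pvPick {l : List (Int × String)} {q : String → Bool} {i : Int} :
    i ∈ pvPick l q ↔ ∃ s, (i, s) ∈ l ∧ q s := by
  constructor
  · intro h
    rcases List.mem_map.1 h with ⟨is, hmem, rfl⟩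
    rcases List.mem_filter.1 hmem with ⟨h1, h2⟩
    exact ⟨is.2, h1, h2⟩
  · rintro ⟨s, h1, h2⟩
    exact List.mem_map.2 ⟨(i, s), List.mem_filter.2 ⟨h1, h2⟩, rfl⟩

lemma pvPick_congr {l : List (Int × String)} {q q' : String → Bool}
    (h : ∀ s, q s = q' s) : pvPick l q = pvPick l q' := by
  unfold pvPick
  rw [List.filter_congr (fun is _ => h is.2)]

lemma rankDict_eq : pvRankDict = PySem.Dict.mk
    [("II",0),("I",1),("V5",2),("V6",3),("V2",4),("III",5),("V1",6),("V3",7),("V4",8),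
     ("AVL",9),("AVF",10),("AVR",11),("MLII",12)] := by decide

-- B's dict lookup computes idxOf into the preferred list (13 when absent)
lemma rank_getD_eq (t : String) :
    ((pvRankDict.getD t (pvPreferred.length : Int)).toNat) = pvPreferred.idxOf t := by
  by_cases h : t ∈ pvPreferred
  · fin_cases h <;> decide
  · have h0 : pvPreferred.idxOf t = 13 := List.idxOf_eq_length_iff.2 h
    rw [h0, rankDict_eq]
    simp only [pvPreferred, List.mem_cons, not_or] at h
    obtain ⟨h1,h2,h3,h4,h5,h6,h7,h8,h9,h10,h11,h12,h13,-⟩ := h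
    simp [PySem.Dict.getD, PySem.Dict.get?_mk_cons, Ne.symm,
      h1,h2,h3,h4,h5,h6,h7,h8,h9,h10,h11,h12,h13]
    simp [PySem.Dict.get?, pvPreferred]

lemma idxOf_le_13 (t : String) : pvPreferred.idxOf t ≤ 13 :=
  List.idxOf_le_length

-- A's condition 's == preferred[j]' is B's condition 'rank of s = j'
lemma rank_cond (j : Nat) (hj : j < pvPreferred.length) (t : String) :
    (t == pvPreferred.getD j "") = (pvPreferred.idxOf t == j) := by
  have hnd : pvPreferred.Nodup := by decide
  rw [List.getD_eq_getElem _ _ hj]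
  by_cases h : pvPreferred.idxOf t = j
  · have hlt : pvPreferred.idxOf t < pvPreferred.length := h ▸ hj
    have hg := List.getElem_idxOf hlt
    subst h
    simp [hg]
  · have hne : ¬ t = pvPreferred[j] := fun e => h (by rw [e]; exact hnd.idxOf_getElem j hj)
    simp [hne, h]

-- 'rank of s = 13' means 's is not a preferred name'
lemma rank_cond13 (t : String) :
    (pvPreferred.idxOf t == 13) = !(pvPreferred.contains t) := by
  have hlen : pvPreferred.length = 13 := rfl
  by_cases h : t ∈ pvPreferred
  · have hiff := List.idxOf_eq_length_iff (a := t) (l := pvPreferred)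
    have hlt : pvPreferred.idxOf t < 13 := by
      rcases Nat.lt_or_eq_of_le (idxOf_le_13 t) with h' | h'
      · exact h'
      · exact absurd (hiff.1 (h'.trans hlen.symm)) (by simpa using h)
    simp [h, Nat.ne_of_lt hlt]
  · have h13 : pvPreferred.idxOf t = 13 := (List.idxOf_eq_length_iff.2 h).trans hlen
    simp [h]
    exact hlen

-- inner loop of A's first phase: appends exactly the matching indices (none re-seen)
lemma innerA (p : String) : ∀ (l : List (Int × String)) (acc : List Int),
    l.Pairwise (fun a b => a.1 < b.1) →
    (∀ is ∈ l, is.2 = p → is.1 ∉ acc) →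
    l.foldl (fun order is =>
        if is.2 == p && !(order.contains is.1) then order ++ [is.1] else order) acc
      = acc ++ pvPick l (fun s => s == p) := by
  intro l
  induction l with
  | nil => intro acc _ _; simp [pvPick]
  | cons x l ih =>
    intro acc hpw hacc
    rcases List.pairwise_cons.1 hpw with ⟨hlt, hpw'⟩
    rw [List.foldl_cons]
    by_cases hp : x.2 = p
    · have hnm : x.1 ∉ acc := hacc x (by simp) hp
      rw [if_pos (by simp [hp, hnm])]
      rw [ih (acc ++ [x.1]) hpw' ?_]
      · simp [pvPick, hp, List.append_assoc]
      · intro is hin hisp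
        have : x.1 < is.1 := hlt is hin
        simp only [List.mem_append, List.mem_singleton]
        rintro (h | h)
        · exact hacc is (List.mem_cons_of_mem _ hin) hisp h
        · omega
    · rw [if_neg (by simp [hp])]
      rw [ih acc hpw' (fun is hin hisp => hacc is (List.mem_cons_of_mem _ hin) hisp)]
      simp [pvPick, hp]

-- injectivity of the index within enumerate
lemma fst_inj_enumerate {u : List String} {a b : Int × String}
    (ha : a ∈ PySem.List.enumerate u 0) (hb : b ∈ PySem.List.enumerate u 0) (h : a.1 = b.1) :
    a = b := by
  rcases (PySem.List.mem_enumerate_iff _ _ _).1 ha with ⟨k, hk, rfl⟩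
  rcases (PySem.List.mem_enumerate_iff _ _ _).1 hb with ⟨m, hm, rfl⟩
  simp at h
  subst h
  rfl

-- outer loop of A's first phase: one block of matches per preferred name
lemma outerA (u : List String) : ∀ (ps : List String) (acc : List Int),
    ps.Nodup →
    (∀ is ∈ PySem.List.enumerate u 0, is.2 ∈ ps → is.1 ∉ acc) →
    ps.foldl (fun order p =>
      (PySem.List.enumerate u 0).foldl (fun order is =>
        if is.2 == p && !(order.contains is.1) then order ++ [is.1] else order) order) acc
      = acc ++ ps.flatMap (fun p => pvPick (PySem.List.enumerate u 0) (fun s => s == p)) := by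
  intro ps
  induction ps with
  | nil => intro acc _ _; simp
  | cons p ps ih =>
    intro acc hnd hacc
    rcases List.nodup_cons.1 hnd with ⟨hp, hnd'⟩
    rw [List.foldl_cons,
      innerA p _ acc (PySem.List.pairwise_lt_enumerate _ _)
        (fun is hin hisp => hacc is hin (by simp [hisp])),
      ih _ hnd' ?_]
    · simp [List.append_assoc]
    · intro is hin hmem
      simp only [List.mem_append]
      rintro (h | h)
      · exact hacc is hin (List.mem_cons_of_mem _ hmem) h
      · rcases mem_pvPick.1 h with ⟨s, hs, hq⟩
        have heq := fst_inj_enumerate hin hs rfl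
        have hss : s = is.2 := by
          have h2 := congrArg Prod.snd heq
          simpa using h2.symm
        exact hp ((hss.symm.trans (beq_iff_eq.1 hq)) ▸ hmem)

-- A's second phase appends the not-yet-listed indices
lemma phase2 : ∀ (l : List Int), ∀ (acc : List Int), l.Nodup →
    l.foldl (fun order i => if !(order.contains i) then order ++ [i] else order) acc
      = acc ++ l.filter (fun i => !(acc.contains i)) := by
  intro l
  induction l with
  | nil => intro acc _; simp
  | cons x l ih =>
    intro acc hnd
    rcases List.nodup_cons.1 hnd with ⟨hx, hnd'⟩
    rw [List.foldl_cons]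
    by_cases h : x ∈ acc
    · rw [if_neg (by simp [h]), ih acc hnd', List.filter_cons]
      simp [h]
    · rw [if_pos (by simp [h]), ih _ hnd',
        List.filter_congr (q := fun i => !(acc.contains i))
          (fun i hi => by
            have hne : i ≠ x := fun e => hx (e ▸ hi)
            simp [hne]),
        List.filter_cons]
      simp [h]

lemma getD_set_self {bs : List (List Int)} {k : Nat} {v : List Int} (h : k < bs.length) :
    (bs.set k v).getD k [] = v := by
  rw [List.getD_eq_getElem?_getD, List.getElem?_set_self (by simpa using h)]
  rfl

lemma getD_set_ne {bs : List (List Int)} {k j : Nat} {v : List Int} (h : k ≠ j) :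
    (bs.set k v).getD j [] = bs.getD j [] := by
  rw [List.getD_eq_getElem?_getD, List.getElem?_set_ne h, ← List.getD_eq_getElem?_getD]

-- B's bucketing loop, characterised bucket by bucket
lemma bucketsFold (f : String → Nat) : ∀ (l : List (Int × String)) (bs : List (List Int)),
    (∀ s, f s < bs.length) →
    l.foldl (fun bs is => bs.set (f is.2) (bs.getD (f is.2) [] ++ [is.1])) bs
      = (List.range bs.length).map (fun j => bs.getD j [] ++ pvPick l (fun s => f s == j)) := by
  intro l
  induction l with
  | nil =>
    intro bs _
    apply List.ext_getElem
    · simp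
    · intro i h1 h2
      simp [pvPick, List.getD_eq_getElem?_getD, List.getElem?_eq_getElem (by simpa using h1)]
  | cons x l ih =>
    intro bs hf
    rw [List.foldl_cons, ih _ (by simpa using hf)]
    rw [List.length_set]
    apply List.map_congr_left
    intro j hj
    have hj' : j < bs.length := by simpa using hj
    by_cases h : f x.2 = j
    · subst h
      rw [getD_set_self (hf x.2), pvPick_cons]
      simp [List.append_assoc]
    · rw [getD_set_ne h, pvPick_cons]
      simp [h]

-- a flatMap over a list is a flatMap over range of getD
lemma flatMap_eq_range {α β : Type} (d : α) : ∀ (l : List α) (g : α → List β),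
    l.flatMap g = (List.range l.length).flatMap (fun j => g (l.getD j d)) := by
  intro l
  induction l with
  | nil => intro g; simp
  | cons x l ih =>
    intro g
    simp only [List.flatMap_cons, List.length_cons, List.range_succ_eq_map,
      List.flatMap_cons, List.flatMap_map]
    simp [ih]

-- enumerate of a mapped list
lemma enumerate_map (f : String → String) : ∀ (xs : List String) (s : Int),
    PySem.List.enumerate (xs.map f) s
      = (PySem.List.enumerate xs s).map (fun is => (is.1, f is.2)) := by
  intro xs
  induction xs with
  | nil => intro s; simp [PySem.List.enumerate_nil]
  | cons x xs ih => intro s; simp [PySem.List.enumerate_cons, ih]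

lemma pvPick_map_enumerate (f : String → String) (xs : List String) (q : String → Bool) :
    pvPick (PySem.List.enumerate (xs.map f) 0) q
      = pvPick (PySem.List.enumerate xs 0) (fun s => q (f s)) := by
  rw [enumerate_map]
  unfold pvPick
  rw [List.filter_map]
  simp [Function.comp_def]

-- inline form of rank_getD_eq, matching the unfolded port of B
lemma rank_getD_eq' (t : String) :
    ((((PySem.List.enumerate pvPreferred 0).foldl (fun d jp => d.insert jp.2 jp.1)
        PySem.Dict.empty).getD t (pvPreferred.length : Int)).toNat) = pvPreferred.idxOf t :=
  rank_getD_eq t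

-- the block of preferred matches A builds first
def pvP (xs : List String) : List Int :=
  pvPreferred.flatMap (fun p =>
    pvPick (PySem.List.enumerate (xs.map PySem.Str.upper) 0) (fun s => s == p))

lemma mem_pvP_iff {xs : List String} {is : Int × String}
    (h : is ∈ PySem.List.enumerate xs 0) :
    (is.1 ∈ pvP xs) ↔ PySem.Str.upper is.2 ∈ pvPreferred := by
  constructor
  · intro hm
    rcases List.mem_flatMap.1 hm with ⟨p, hp, hpick⟩
    rcases mem_pvPick.1 hpick with ⟨s, hs, hq⟩
    rw [enumerate_map] at hs
    rcases List.mem_map.1 hs with ⟨e, he, heq⟩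
    have h1 : e.1 = is.1 := by have := congrArg Prod.fst heq; simpa using this
    have h2 : PySem.Str.upper e.2 = s := by have := congrArg Prod.snd heq; simpa using this
    have h3 : e = is := fst_inj_enumerate he h h1
    rw [← h3, h2, beq_iff_eq.1 hq]
    exact hp
  · intro hmem
    refine List.mem_flatMap.2 ⟨PySem.Str.upper is.2, hmem,
      mem_pvPick.2 ⟨PySem.Str.upper is.2, ?_, by simp⟩⟩
    rw [enumerate_map]
    exact List.mem_map.2 ⟨is, h, rfl⟩

-- A's second phase produces exactly B's overflow bucket
lemma filter_part (xs : List String) :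
    (PySem.List.pyRange 0 (xs.length : Int) 1).filter (fun i => !((pvP xs).contains i))
      = pvPick (PySem.List.enumerate xs 0)
          (fun s => pvPreferred.idxOf (PySem.Str.upper s) == 13) := by
  have hmapfst : (PySem.List.enumerate xs 0).map (·.1)
      = PySem.List.pyRange 0 (xs.length : Int) 1 := by
    have := PySem.List.map_fst_enumerate xs 0
    simpa using this
  rw [← hmapfst, List.filter_map]
  unfold pvPick
  congr 1
  apply List.filter_congr
  intro is hin
  have hiff := mem_pvP_iff hin
  by_cases hm : PySem.Str.upper is.2 ∈ pvPreferred
  · have : is.1 ∈ pvP xs := hiff.2 hm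
    simp only [Function.comp_apply, rank_cond13]
    simp [this, hm]
  · have : is.1 ∉ pvP xs := fun hc => hm (hiff.1 hc)
    simp only [Function.comp_apply, rank_cond13]
    simp [this, hm]

-- A's first phase produces exactly B's 13 preferred buckets
lemma pvP_eq_buckets (xs : List String) :
    pvP xs = (List.range 13).flatMap (fun j =>
      pvPick (PySem.List.enumerate xs 0)
        (fun s => pvPreferred.idxOf (PySem.Str.upper s) == j)) := by
  unfold pvP
  rw [flatMap_eq_range ""]
  rw [List.flatMap_def, List.flatMap_def]
  congr 1
  apply List.map_congr_left
  intro j hj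
  rw [pvPick_map_enumerate]
  apply pvPick_congr
  intro s
  exact rank_cond j (by simpa [pvPreferred] using hj) (PySem.Str.upper s)

-- A unfolded to its two phases
lemma A_eq (xs : List String) :
    build_lead_trial_order xs
      = pvP xs ++ (PySem.List.pyRange 0 (xs.length : Int) 1).filter
          (fun i => !((pvP xs).contains i)) := by
  simp only [build_lead_trial_order]
  rw [outerA _ pvPreferred [] (by decide) (by simp)]
  rw [phase2 _ _ (PySem.List.nodup_pyRange_one _ _)]
  simp only [List.nil_append, pvP]

-- B unfolded to its buckets
lemma B_eq (xs : List String) :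
    build_lead_trial_order_alt xs
      = (List.range 14).flatMap (fun j =>
          pvPick (PySem.List.enumerate xs 0)
            (fun s => pvPreferred.idxOf (PySem.Str.upper s) == j)) := by
  simp only [build_lead_trial_order_alt, rank_getD_eq']
  rw [bucketsFold (fun s => pvPreferred.idxOf (PySem.Str.upper s))
      (PySem.List.enumerate xs 0) (List.replicate (pvPreferred.length + 1) [])
      (fun s => by simpa [pvPreferred] using Nat.lt_succ_of_le (idxOf_le_13 (PySem.Str.upper s)))]
  rw [List.flatMap_def]
  congr 1

-- ===== VERDICT (by name: the statement is the Claim_ definition above) =====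
theorem build_lead_trial_order_spec : Claim_equal_build_lead_trial_order := by
  intro xs _
  unfold Spec_build_lead_trial_order
  rw [A_eq, filter_part, pvP_eq_buckets, B_eq]
  conv_rhs => rw [show (14 : Nat) = 13 + 1 from rfl, List.range_succ, List.flatMap_append]
  simp only [List.flatMap_cons, List.flatMap_nil, List.append_nil]
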